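-- pv_equiv track=rewrite | github.com/oracle/graalpython | graalpython/com.oracle.graal.python.benchmarks/python/micro/special-len.py | do_compute
-- ===== SOURCE A (Python) =====
-- class Num(object):
--     def __init__(self, n):
--         self.n = n
--
--     def __len__(self):
--         return self.n
--
--     def __repr__(self):
--         return repr(self.n)
--
-- def do_compute(num):
--     for i in range(num):
--         sum_ = 0
--         one = Num(42)
--         j = 0
--         while j < num:
--             sum_ = sum_ + len(one)
--             j += 1
--
--     return sum_
-- ===== SOURCE B (Python) =====
-- def do_compute(num):
--     # closed form: each of num outer iterations recomputes sum_ = 42*num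
--     return 42 * num
-- ===== Notes on version B (the rewrite author's own statement) =====
-- stated objective: faster
-- what changed: replaces the O(num^2) nested loops (which add len(Num(42))=42 num times, num times over) by the closed form 42*num; num<=0, where A raises UnboundLocalError, is excluded by Pre_
import Mathlib
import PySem

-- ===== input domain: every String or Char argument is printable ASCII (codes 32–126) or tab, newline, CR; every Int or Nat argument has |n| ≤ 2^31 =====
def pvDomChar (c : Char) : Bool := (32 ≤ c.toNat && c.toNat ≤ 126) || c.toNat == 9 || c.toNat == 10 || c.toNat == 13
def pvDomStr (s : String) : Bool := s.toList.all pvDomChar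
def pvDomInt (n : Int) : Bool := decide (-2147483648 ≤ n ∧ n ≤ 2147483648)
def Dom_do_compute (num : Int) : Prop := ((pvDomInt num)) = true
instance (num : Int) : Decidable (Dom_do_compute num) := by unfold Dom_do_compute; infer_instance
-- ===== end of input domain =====

-- B replaces A's O(num^2) nested loops by the closed form 42*num (faster, asymptotic).

-- ===== PORT A =====
-- the inner 'while j < num: sum_ += len(one); j += 1' loop, with len(one) = 42
def pvWhile_do_compute : Nat → Int → Int
  | 0, s => s
  | n+1, s => pvWhile_do_compute n (s + 42)

def do_compute (num : Int) : Int :=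
  -- for i in range(num): sum_ = 0; j = 0; while j < num: sum_ += 42; j += 1
  (PySem.List.pyRange 0 num 1).foldl (fun _ _i => pvWhile_do_compute num.toNat 0) 0

-- ===== PORT B =====
def do_compute_alt (num : Int) : Int := 42 * num

-- ===== PRECONDITION & SPEC =====
-- Pre_ excludes num <= 0, where A raises UnboundLocalError (sum_ is never assigned).
def Pre_do_compute (num : Int) : Prop := 1 ≤ num
instance (num : Int) : Decidable (Pre_do_compute num) := by unfold Pre_do_compute; infer_instance
def pvWitness_do_compute : Int := 3

def Spec_do_compute (num : Int) (out : Int) : Prop := out = do_compute_alt num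
instance (num : Int) (out : Int) : Decidable (Spec_do_compute num out) := by unfold Spec_do_compute; infer_instance

-- ===== CLAIM =====
def Claim_equal_do_compute : Prop := ∀ (num : Int), Dom_do_compute num → Pre_do_compute num → Spec_do_compute num (do_compute num)

-- ===== LEMMAS AND PROOFS =====
theorem pvWhile_eq (n : Nat) : ∀ s : Int, pvWhile_do_compute n s = s + 42 * n := by
  induction n with
  | zero => intro s; simp [pvWhile_do_compute]
  | succ m ih => intro s; simp [pvWhile_do_compute, ih]; ring

theorem foldl_const_cons {α β : Type} (c : β) (x : α) (xs : List α) :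
    ∀ a : β, (x :: xs).foldl (fun _ _ => c) a = c := by
  induction xs with
  | nil => intro a; simp
  | cons y ys ih => intro a; simpa using ih c

-- ===== VERDICT =====
theorem do_compute_spec : Claim_equal_do_compute := by
  intro num _ hpre
  unfold Pre_do_compute at hpre
  unfold Spec_do_compute do_compute do_compute_alt
  have hne : PySem.List.pyRange 0 num 1 ≠ [] := by
    intro h
    have := PySem.List.length_pyRange_one 0 num
    rw [h] at this
    simp at this
    omega
  obtain ⟨x, xs, hx⟩ := List.exists_cons_of_ne_nil hne
  rw [hx, foldl_const_cons, pvWhile_eq]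
  have : (num.toNat : Int) = num := Int.toNat_of_nonneg (by omega)
  rw [this]; ring
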